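-- pv_equiv track=rewrite | github.com/Xuyuanp/leetcode-2021 | 1092.shortest-common-supersequence.py | is_shortest_common_supersequence
-- ===== SOURCE A (Python) =====
-- def is_shortest_common_supersequence(scs: str, str1: str, str2: str) -> bool:
--     m, n = len(str1), len(str2)
--     i = j = 0
--     for c in scs:
--         if i < m and j < n and c == str1[i] == str2[j]:
--             i += 1
--             j += 1
--         elif i < m and c == str1[i]:
--             i += 1
--         elif j < n and c == str2[j]:
--             j += 1
--         else:
--             return False
--     return i == m and j == n
-- ===== SOURCE B (Python) =====
-- def is_shortest_common_supersequence(scs: str, str1: str, str2: str) -> bool: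
--     def match(s):
--         p = 0
--         marks = []
--         for c in scs:
--             if p < len(s) and c == s[p]:
--                 p += 1
--                 marks.append(True)
--             else:
--                 marks.append(False)
--         return p == len(s), marks
--
--     ok1, m1 = match(str1)
--     ok2, m2 = match(str2)
--     return ok1 and ok2 and all(a or b for a, b in zip(m1, m2))
-- ===== Notes on version B (the rewrite author's own statement) =====
-- stated objective: alternative
-- what changed: B replaces A's single interleaved two-pointer loop by two independent greedy subsequence passes over scs, each recording which positions it consumed, and then checks that both strings were fully matched and every position of scs was consumed by at least one pass.
import Mathlib
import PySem

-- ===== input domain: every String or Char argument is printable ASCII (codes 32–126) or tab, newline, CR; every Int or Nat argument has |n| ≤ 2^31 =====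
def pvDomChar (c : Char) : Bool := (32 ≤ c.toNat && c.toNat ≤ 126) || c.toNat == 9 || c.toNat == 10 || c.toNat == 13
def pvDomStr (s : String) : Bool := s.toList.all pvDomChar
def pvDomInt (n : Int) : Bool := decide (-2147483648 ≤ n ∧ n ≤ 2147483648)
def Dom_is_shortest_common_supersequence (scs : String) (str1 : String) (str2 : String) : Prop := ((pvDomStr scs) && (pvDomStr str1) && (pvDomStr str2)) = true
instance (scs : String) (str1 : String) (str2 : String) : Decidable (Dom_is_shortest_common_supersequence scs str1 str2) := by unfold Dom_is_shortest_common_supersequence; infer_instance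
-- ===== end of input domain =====

-- B replaces A's single interleaved two-pointer loop by two independent greedy
-- subsequence passes over scs plus a coverage check (objective: alternative decomposition).

-- ===== PORT A =====
-- A's for-loop over scs with the early 'return False' becomes structural recursion
-- on the character list, carrying the two pointers i, j.
def pvA_loop (s1 s2 : List Char) (m n : Nat) : List Char → Nat → Nat → Bool
  | [], i, j => i == m && j == n
  | c :: rest, i, j =>
    if i < m && j < n && (c == s1.getD i ' ') && (c == s2.getD j ' ') then
      pvA_loop s1 s2 m n rest (i + 1) (j + 1)
    else if i < m && (c == s1.getD i ' ') then
      pvA_loop s1 s2 m n rest (i + 1) j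
    else if j < n && (c == s2.getD j ' ') then
      pvA_loop s1 s2 m n rest i (j + 1)
    else
      false

def is_shortest_common_supersequence (scs : String) (str1 : String) (str2 : String) : Bool :=
  pvA_loop str1.toList str2.toList str1.toList.length str2.toList.length scs.toList 0 0

-- ===== PORT B =====
-- One greedy pass of B's helper match(s): walks scs, advancing the pointer p on a
-- match and recording per position whether it was consumed; returns (final p, marks).
def pvB_pass (s : List Char) : List Char → Nat → Nat × List Bool
  | [], p => (p, [])
  | c :: rest, p =>
    if p < s.length && (c == s.getD p ' ') then
      let r := pvB_pass s rest (p + 1)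
      (r.1, true :: r.2)
    else
      let r := pvB_pass s rest p
      (r.1, false :: r.2)

def is_shortest_common_supersequence_alt (scs : String) (str1 : String) (str2 : String) : Bool :=
  let r1 := pvB_pass str1.toList scs.toList 0
  let r2 := pvB_pass str2.toList scs.toList 0
  (r1.1 == str1.toList.length) && (r2.1 == str2.toList.length) &&
    (List.zipWith (fun a b => a || b) r1.2 r2.2).all id

-- ===== PRECONDITION & SPEC =====
def Spec_is_shortest_common_supersequence (scs : String) (str1 : String) (str2 : String) (out : Bool) : Prop := out = is_shortest_common_supersequence_alt scs str1 str2
instance (scs : String) (str1 : String) (str2 : String) (out : Bool) : Decidable (Spec_is_shortest_common_supersequence scs str1 str2 out) := by unfold Spec_is_shortest_common_supersequence; infer_instance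

-- ===== CLAIM (what is proved, stated in full; the proofs are below) =====
def Claim_equal_is_shortest_common_supersequence : Prop := ∀ (scs : String) (str1 : String) (str2 : String), Dom_is_shortest_common_supersequence scs str1 str2 → Spec_is_shortest_common_supersequence scs str1 str2 (is_shortest_common_supersequence scs str1 str2)

-- ===== LEMMAS AND PROOFS =====

-- Core invariant: A's interleaved loop from pointers (i, j) computes exactly the
-- conjunction of the two independent passes from i and from j plus full coverage.
theorem pvA_loop_eq_passes (s1 s2 : List Char) :
    ∀ (cs : List Char) (i j : Nat),
      pvA_loop s1 s2 s1.length s2.length cs i j =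
        (((pvB_pass s1 cs i).1 == s1.length) && ((pvB_pass s2 cs j).1 == s2.length) &&
          (List.zipWith (fun a b => a || b) (pvB_pass s1 cs i).2 (pvB_pass s2 cs j).2).all id) := by
  intro cs
  induction cs with
  | nil => intro i j; simp [pvA_loop, pvB_pass]
  | cons c rest ih =>
    intro i j
    simp only [pvA_loop, pvB_pass]
    split_ifs <;> try simp_all [ih, beq_iff_eq]
    -- contradictory branch: both chars match but the guard 's1[i] = s2[j]' is denied
    rename_i h1 h2 h3
    obtain ⟨⟨⟨hi, hj⟩, e1⟩, e2⟩ := h2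
    rw [List.getElem?_eq_getElem hi] at e1
    rw [List.getElem?_eq_getElem hj] at e2
    simp only [Option.getD_some] at e1 e2
    exact absurd (e1.symm.trans e2) h3

-- ===== VERDICT (by name: the statement is the Claim_ definition above) =====
theorem is_shortest_common_supersequence_spec : Claim_equal_is_shortest_common_supersequence := by
  intro scs str1 str2 _
  unfold Spec_is_shortest_common_supersequence
  unfold is_shortest_common_supersequence is_shortest_common_supersequence_alt
  rw [pvA_loop_eq_passes]
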